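-- pv_equiv track=rewrite | github.com/piodossantos/tesis | utils.py | get_longest_intervals
-- ===== SOURCE A (Python) =====
-- from collections import defaultdict
--
-- def get_longest_intervals(labels):
--     intervals = defaultdict(list)
--     current_interval = (1, 1, labels[0])
--     for index, label in enumerate(labels[1:]):
--         current_start, current_end, current_value = current_interval
--         if(label == current_value):
--             current_interval = (current_start, index + 2, label)
--         else:
--             intervals[current_value].append(current_interval)
--             current_interval = (current_end + 1, index + 2, label)
--     intervals[current_interval[2]].append(current_interval)
--     maximum_intervals = {k:max(v, key=lambda x: x[1] - x[0] + 1) for (k,v) in intervals.items()}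
--     return sorted(maximum_intervals.values(), key= lambda x: x[0])
-- ===== SOURCE B (Python) =====
-- def get_longest_intervals(labels):
--     best = {}
--
--     def close(start, end, value):
--         prev = best.get(value)
--         if prev is None or end - start > prev[1] - prev[0]:
--             best[value] = (start, end, value)
--
--     start, value = 1, labels[0]
--     for pos, label in enumerate(labels[1:], start=2):
--         if label != value:
--             close(start, pos - 1, value)
--             start, value = pos, label
--     close(start, len(labels), value)
--     return sorted(best.values(), key=lambda x: x[0])
-- ===== Notes on version B (the rewrite author's own statement) =====
-- stated objective: faster
-- what changed: B replaces A's two-phase pipeline (collect every run into a defaultdict of lists, then take max per label, then sort) with a single scan keeping only (start, value) of the current run and updating one best-interval-per-label dict online (strict '>' keeps the earliest run on ties, matching max's first-maximum rule).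
import Mathlib
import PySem

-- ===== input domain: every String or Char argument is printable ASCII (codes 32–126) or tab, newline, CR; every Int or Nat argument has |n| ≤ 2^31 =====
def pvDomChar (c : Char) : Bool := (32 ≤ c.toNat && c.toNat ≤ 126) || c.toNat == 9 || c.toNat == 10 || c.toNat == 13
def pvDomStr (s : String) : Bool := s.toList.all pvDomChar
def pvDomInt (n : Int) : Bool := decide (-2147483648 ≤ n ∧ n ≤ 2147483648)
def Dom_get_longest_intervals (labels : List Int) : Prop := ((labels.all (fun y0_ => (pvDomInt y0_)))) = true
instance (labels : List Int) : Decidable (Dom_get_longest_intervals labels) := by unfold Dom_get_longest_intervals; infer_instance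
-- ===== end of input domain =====

-- B folds A's collect-all-runs-then-max-per-label phases into one online best-per-label update (objective: faster by a constant factor, measured).

-- ===== PORT A =====
-- the Python lambda computing an interval's length, used by both programs
def pvKey (x : Int × Int × Int) : Int := x.2.1 - x.1 + 1

def pvStepA (st : PySem.Dict Int (List (Int × Int × Int)) × (Int × Int × Int))
    (p : Int × Int) : PySem.Dict Int (List (Int × Int × Int)) × (Int × Int × Int) :=
  -- current_start, current_end, current_value = current_interval
  if p.2 == st.2.2.2 then
    (st.1, (st.2.1, p.1 + 2, p.2))
  else
    (st.1.modify st.2.2.2 [] (· ++ [st.2]), (st.2.2.1 + 1, p.1 + 2, p.2))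

def get_longest_intervals (labels : List Int) : List (Int × Int × Int) :=
  -- reading the first element raises IndexError on the empty list: Pre_ requires labels ≠ []
  let st := (PySem.List.enumerate (PySem.List.slice labels (some 1) none) 0).foldl pvStepA
      (PySem.Dict.empty, (1, 1, PySem.List.pyGetD labels 0 0))
  let intervals := st.1.modify st.2.2.2 [] (· ++ [st.2])
  -- max(v, key=…) on a per-label list, always nonempty here, so the .getD default is never used
  let maximum := PySem.Dict.mk (intervals.items.map (fun kv => (kv.1, (PySem.List.max? kv.2 pvKey).getD (0, 0, 0))))
  PySem.List.sorted maximum.values (fun x => x.1) false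

-- ===== PORT B =====
def pvClose (best : PySem.Dict Int (Int × Int × Int)) (run : Int × Int × Int) :
    PySem.Dict Int (Int × Int × Int) :=
  match best.get? run.2.2 with
  | none => best.insert run.2.2 run
  | some prev => if pvKey prev < pvKey run then best.insert run.2.2 run else best

def pvStepB (st : PySem.Dict Int (Int × Int × Int) × (Int × Int)) (p : Int × Int) :
    PySem.Dict Int (Int × Int × Int) × (Int × Int) :=
  if p.2 != st.2.2 then (pvClose st.1 (st.2.1, p.1 - 1, st.2.2), (p.1, p.2)) else st

def get_longest_intervals_alt (labels : List Int) : List (Int × Int × Int) :=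
  let st := (PySem.List.enumerate (PySem.List.slice labels (some 1) none) 2).foldl pvStepB
      (PySem.Dict.empty, (1, PySem.List.pyGetD labels 0 0))
  PySem.List.sorted ((pvClose st.1 (st.2.1, (labels.length : Int), st.2.2)).values) (fun x => x.1) false

-- ===== PRECONDITION & SPEC =====
-- reading the first element raises IndexError on the empty list (in A and in B alike); nothing else raises
def Pre_get_longest_intervals (labels : List Int) : Prop := labels ≠ []
instance (labels : List Int) : Decidable (Pre_get_longest_intervals labels) := by unfold Pre_get_longest_intervals; infer_instance
def pvWitness_get_longest_intervals : List Int := [0, 0, 1]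

def Spec_get_longest_intervals (labels : List Int) (out : List (Int × Int × Int)) : Prop := out = get_longest_intervals_alt labels
instance (labels : List Int) (out : List (Int × Int × Int)) : Decidable (Spec_get_longest_intervals labels out) := by unfold Spec_get_longest_intervals; infer_instance

-- ===== CLAIM (what is proved, stated in full; the proofs are below) =====
def Claim_equal_get_longest_intervals : Prop := ∀ (labels : List Int), Dom_get_longest_intervals labels → Pre_get_longest_intervals labels → Spec_get_longest_intervals labels (get_longest_intervals labels)

-- ===== LEMMAS AND PROOFS =====

-- per-label reduction A performs afterwards: first maximum-length interval of the collected list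
def pvF (kv : Int × List (Int × Int × Int)) : Int × (Int × Int × Int) :=
  (kv.1, (PySem.List.max? kv.2 pvKey).getD (0, 0, 0))

-- invariant tying B's online dict to A's collect-everything dict
def pvInv (d : PySem.Dict Int (List (Int × Int × Int)))
    (b : PySem.Dict Int (Int × Int × Int)) : Prop :=
  b.items = d.items.map pvF ∧ d.keys.Nodup ∧ ∀ kv ∈ d.items, kv.2 ≠ []

lemma pv_find_map (l : List (Int × List (Int × Int × Int))) (k : Int) :
    (l.map pvF).find? (fun p => p.1 == k) = (l.find? (fun p => p.1 == k)).map pvF := by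
  induction l with
  | nil => simp
  | cons x xs ih =>
    by_cases h : x.1 = k <;> simp [pvF, h, ih]

lemma pv_close_step (d : PySem.Dict Int (List (Int × Int × Int)))
    (b : PySem.Dict Int (Int × Int × Int)) (run : Int × Int × Int)
    (h : pvInv d b) :
    pvInv (d.modify run.2.2 [] (· ++ [run])) (pvClose b run) := by
  obtain ⟨hmap, hnd, hne⟩ := h
  have hget : b.get? run.2.2 =
      (d.items.find? (fun p => p.1 == run.2.2)).map
        (fun p => (PySem.List.max? p.2 pvKey).getD (0, 0, 0)) := by
    simp only [PySem.Dict.get?, hmap, pv_find_map]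
    cases d.items.find? (fun p => p.1 == run.2.2) <;> simp [pvF]
  cases hfd : d.items.find? (fun p => p.1 == run.2.2) with
  | none =>
    have hdget : d.get? run.2.2 = none := by simp [PySem.Dict.get?, hfd]
    have hcd : d.contains run.2.2 = false := by
      rw [PySem.Dict.contains_eq_isSome_get?, hdget]; rfl
    have hbget : b.get? run.2.2 = none := by rw [hget, hfd]; rfl
    have hcb : b.contains run.2.2 = false := by
      rw [PySem.Dict.contains_eq_isSome_get?, hbget]; rfl
    have hmod : d.modify run.2.2 [] (· ++ [run]) = d.insert run.2.2 [run] := by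
      simp [PySem.Dict.modify, PySem.Dict.getD, hdget]
    rw [hmod]
    unfold pvClose
    rw [hbget]
    refine ⟨?_, PySem.Dict.nodup_keys_insert _ _ _ hnd, ?_⟩
    · rw [PySem.Dict.items_insert_of_not_contains _ _ hcd,
        PySem.Dict.items_insert_of_not_contains _ _ hcb, hmap, List.map_append]
      simp [pvF, PySem.List.max?]
    · intro kv hkv
      rcases (PySem.Dict.mem_items_insert _ _ _ _).1 hkv with h1 | ⟨h1, _⟩
      · subst h1; simp
      · exact hne _ h1
  | some q =>
    have hq1 : q.1 = run.2.2 := by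
      have := List.find?_some hfd
      simpa using this
    have hqm : q ∈ d.items := List.mem_of_find?_eq_some hfd
    have hlst : q.2 ≠ [] := hne q hqm
    obtain ⟨m, hm⟩ : ∃ m, PySem.List.max? q.2 pvKey = some m := by
      cases hmx : PySem.List.max? q.2 pvKey with
      | none => exact absurd ((PySem.List.max?_eq_none_iff _ _).1 hmx) hlst
      | some m => exact ⟨m, rfl⟩
    have hdget : d.get? run.2.2 = some q.2 := by simp [PySem.Dict.get?, hfd]
    have hcd : d.contains run.2.2 = true := by
      rw [PySem.Dict.contains_eq_isSome_get?, hdget]; rfl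
    have hbget : b.get? run.2.2 = some m := by rw [hget, hfd]; simp [hm]
    have hcb : b.contains run.2.2 = true := by
      rw [PySem.Dict.contains_eq_isSome_get?, hbget]; rfl
    have huniq : ∀ p ∈ d.items, p.1 = run.2.2 → p.2 = q.2 := by
      intro p hp hpv
      have hpmem : (p.1, p.2) ∈ d.items := by simpa using hp
      have := PySem.Dict.get?_of_mem_items d hpmem hnd
      rw [hpv, hdget] at this
      exact (Option.some.inj this).symm
    have hmod : d.modify run.2.2 [] (· ++ [run]) = d.insert run.2.2 (q.2 ++ [run]) := by
      simp [PySem.Dict.modify, PySem.Dict.getD, hdget]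
    have hmax : PySem.List.max? (q.2 ++ [run]) pvKey =
        some (if pvKey m < pvKey run then run else m) := by
      unfold PySem.List.max? at hm ⊢
      rw [List.foldl_append, hm]
      by_cases hlt : pvKey m < pvKey run <;> simp [hlt]
    rw [hmod]
    simp only [pvClose, hbget]
    by_cases hlt : pvKey m < pvKey run
    · rw [if_pos hlt]
      refine ⟨?_, PySem.Dict.nodup_keys_insert _ _ _ hnd, ?_⟩
      · rw [PySem.Dict.items_insert_of_contains _ _ hcd,
          PySem.Dict.items_insert_of_contains _ _ hcb, hmap,
          List.map_map, List.map_map]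
        refine List.map_congr_left (fun p hp => ?_)
        by_cases hpv : p.1 = run.2.2
        · simp [Function.comp, pvF, hpv, hmax, hlt, huniq p hp hpv]
        · simp [Function.comp, pvF, hpv]
      · intro kv hkv
        rcases (PySem.Dict.mem_items_insert _ _ _ _).1 hkv with h1 | ⟨h1, _⟩
        · subst h1; simp
        · exact hne _ h1
    · rw [if_neg hlt]
      refine ⟨?_, PySem.Dict.nodup_keys_insert _ _ _ hnd, ?_⟩
      · rw [PySem.Dict.items_insert_of_contains _ _ hcd, hmap, List.map_map]
        refine List.map_congr_left (fun p hp => ?_)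
        by_cases hpv : p.1 = run.2.2
        · simp [Function.comp, pvF, hpv, hmax, hlt, huniq p hp hpv, hm]
        · simp [Function.comp, pvF, hpv]
      · intro kv hkv
        rcases (PySem.Dict.mem_items_insert _ _ _ _).1 hkv with h1 | ⟨h1, _⟩
        · subst h1; simp
        · exact hne _ h1

lemma pv_loop (xs : List Int) (s : Int)
    (d : PySem.Dict Int (List (Int × Int × Int))) (b : PySem.Dict Int (Int × Int × Int))
    (cs cv : Int) (h : pvInv d b) :
    pvInv ((PySem.List.enumerate xs s).foldl pvStepA (d, (cs, s + 1, cv))).1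
        ((PySem.List.enumerate xs (s + 2)).foldl pvStepB (b, (cs, cv))).1 ∧
    ((PySem.List.enumerate xs s).foldl pvStepA (d, (cs, s + 1, cv))).2 =
      (((PySem.List.enumerate xs (s + 2)).foldl pvStepB (b, (cs, cv))).2.1,
       s + 1 + xs.length,
       ((PySem.List.enumerate xs (s + 2)).foldl pvStepB (b, (cs, cv))).2.2) := by
  induction xs generalizing s d b cs cv with
  | nil => exact ⟨h, by simp⟩
  | cons x xs ih =>
    rw [PySem.List.enumerate_cons, PySem.List.enumerate_cons]
    simp only [List.foldl_cons]
    by_cases hx : x = cv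
    · subst hx
      have hA : pvStepA (d, (cs, s + 1, x)) (s, x) = (d, (cs, s + 1 + 1, x)) := by
        simp [pvStepA]; ring
      have hB : pvStepB (b, (cs, x)) (s + 2, x) = (b, (cs, x)) := by
        simp [pvStepB]
      rw [hA, hB]
      have he : s + 2 + 1 = s + 1 + 2 := by ring
      rw [he]
      rcases ih (s + 1) d b cs x h with ⟨ih1, ih2⟩
      refine ⟨ih1, ?_⟩
      rw [ih2]
      simp only [List.length_cons, Prod.mk.injEq]
      exact ⟨trivial, by push_cast; ring, trivial⟩
    · have hA : pvStepA (d, (cs, s + 1, cv)) (s, x) =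
          (d.modify cv [] (· ++ [(cs, s + 1, cv)]), (s + 1 + 1, s + 1 + 1, x)) := by
        simp [pvStepA, hx]
        omega
      have hB : pvStepB (b, (cs, cv)) (s + 2, x) =
          (pvClose b (cs, s + 1, cv), (s + 1 + 1, x)) := by
        have : s + 2 - 1 = s + 1 := by ring
        simp [pvStepB, hx, this]; ring
      rw [hA, hB]
      have he : s + 2 + 1 = s + 1 + 2 := by ring
      rw [he]
      have hInv' : pvInv (d.modify cv [] (· ++ [(cs, s + 1, cv)])) (pvClose b (cs, s + 1, cv)) :=
        pv_close_step d b (cs, s + 1, cv) h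
      rcases ih (s + 1) (d.modify cv [] (· ++ [(cs, s + 1, cv)])) (pvClose b (cs, s + 1, cv))
          (s + 1 + 1) x hInv' with ⟨ih1, ih2⟩
      refine ⟨ih1, ?_⟩
      rw [ih2]
      simp only [List.length_cons, Prod.mk.injEq]
      exact ⟨trivial, by push_cast; ring, trivial⟩

-- ===== VERDICT (by name: the statement is the Claim_ definition above) =====
theorem get_longest_intervals_spec : Claim_equal_get_longest_intervals := by
  intro labels _ hpre
  unfold Spec_get_longest_intervals
  cases labels with
  | nil => exact absurd rfl hpre
  | cons a t =>
    unfold get_longest_intervals get_longest_intervals_alt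
    simp only [PySem.List.slice_from_one, List.tail_cons]
    obtain ⟨h1, h2⟩ := pv_loop t 0 PySem.Dict.empty PySem.Dict.empty 1
      (PySem.List.pyGetD (a :: t) 0 0)
      ⟨rfl, by simp [PySem.Dict.keys, PySem.Dict.empty], by simp [PySem.Dict.empty]⟩
    norm_num at h1 h2 ⊢
    rw [h2]
    have h3 := pv_close_step
      (List.foldl pvStepA (PySem.Dict.empty, (1, 1, a)) (PySem.List.enumerate t 0)).1
      (List.foldl pvStepB (PySem.Dict.empty, (1, a)) (PySem.List.enumerate t 2)).1
      ((List.foldl pvStepB (PySem.Dict.empty, (1, a)) (PySem.List.enumerate t 2)).2.1,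
       1 + (t.length : Int),
       (List.foldl pvStepB (PySem.Dict.empty, (1, a)) (PySem.List.enumerate t 2)).2.2) h1
    rw [show ((t.length : Int) + 1) = 1 + (t.length : Int) from by ring]
    simp only [PySem.Dict.values, h3.1, List.map_map]
    rfl
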